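-- pv_equiv track=rewrite | github.com/kakato10/week0_problems | magic_string/solution.py | magic_string
-- ===== SOURCE A (Python) =====
-- def magic_string(string):
--     step_count = 0
--     for index in range(0, len(string) // 2):
--         if string[index] != ">":
--             step_count = step_count + 1
--     for index in range(len(string) // 2, len(string)):
--         if string[index] != "<":
--             step_count = step_count + 1
--     return step_count
-- ===== SOURCE B (Python) =====
-- def magic_string(string):
--     n = len(string)
--     mismatches = 0
--     i, j = 0, n - 1
--     while i < j:
--         if string[i] != ">":
--             mismatches += 1
--         if string[j] != "<":
--             mismatches += 1
--         i += 1
--         j -= 1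
--     if i == j and string[i] != "<":
--         mismatches += 1
--     return mismatches
-- ===== Notes on version B (the rewrite author's own statement) =====
-- stated objective: alternative
-- what changed: Replaces A's two sequential half-scans by a single outside-in two-pointer loop that pairs the i-th character from the front (expected '>') with the i-th from the back (expected '<') and checks the middle character of an odd-length string after the loop; correct because every front index visited is below len//2 and every back index is at or above it.
import Mathlib
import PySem

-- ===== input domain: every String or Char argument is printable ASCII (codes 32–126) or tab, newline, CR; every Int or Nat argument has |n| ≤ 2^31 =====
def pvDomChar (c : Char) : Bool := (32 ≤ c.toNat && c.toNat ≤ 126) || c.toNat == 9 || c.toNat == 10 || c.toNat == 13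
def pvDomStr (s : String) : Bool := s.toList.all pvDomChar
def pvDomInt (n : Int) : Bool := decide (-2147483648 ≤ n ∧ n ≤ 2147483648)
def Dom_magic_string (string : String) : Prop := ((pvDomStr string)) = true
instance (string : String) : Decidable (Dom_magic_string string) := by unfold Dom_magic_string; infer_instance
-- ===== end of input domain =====

-- B replaces A's two sequential half-scans by one outside-in two-pointer loop pairing front ('>') and back ('<') characters, with a middle-character check for odd length (objective: alternative).

-- ===== PORT A =====
def magic_string (string : String) : Int :=
  let s := string.toList
  let n : Int := PySem.Str.len string
  let step1 := (PySem.List.pyRange 0 (PySem.Int.floordiv n 2)).foldl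
      (fun acc i => if PySem.List.pyGetD s i ' ' != '>' then acc + 1 else acc) (0 : Int)
  (PySem.List.pyRange (PySem.Int.floordiv n 2) n).foldl
      (fun acc i => if PySem.List.pyGetD s i ' ' != '<' then acc + 1 else acc) step1

-- ===== PORT B =====
-- the while loop of Source B, with the trailing `if i == j …` check as the loop's exit case
def msGo (s : List Char) (i j acc : Int) : Int :=
  if _h : i < j then
    let acc1 := if PySem.List.pyGetD s i ' ' != '>' then acc + 1 else acc
    let acc2 := if PySem.List.pyGetD s j ' ' != '<' then acc1 + 1 else acc1
    msGo s (i + 1) (j - 1) acc2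
  else if i = j then (if PySem.List.pyGetD s i ' ' != '<' then acc + 1 else acc)
  else acc
termination_by (j + 1 - i).toNat
decreasing_by omega

def magic_string_alt (string : String) : Int :=
  let n := PySem.Str.len string
  msGo string.toList 0 (n - 1) 0

-- ===== PRECONDITION & SPEC =====
def Spec_magic_string (string : String) (out : Int) : Prop := out = magic_string_alt string
instance (string : String) (out : Int) : Decidable (Spec_magic_string string out) := by unfold Spec_magic_string; infer_instance

-- ===== CLAIM (what is proved, stated in full; the proofs are below) =====
def Claim_equal_magic_string : Prop := ∀ (string : String), Dom_magic_string string → Spec_magic_string string (magic_string string)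

-- ===== LEMMAS AND PROOFS =====

-- mismatch count over the index interval [a, b)
def pvCnt (s : List Char) (a b : Nat) (c : Char) : Nat :=
  (List.range' a (b - a)).countP (fun x => s.getD x ' ' != c)

theorem pvCnt_empty (s : List Char) (a : Nat) (c : Char) : pvCnt s a a c = 0 := by
  simp [pvCnt]

theorem pvCnt_cons (s : List Char) (a b : Nat) (c : Char) (h : a < b) :
    (pvCnt s a b c : Int) = (if s.getD a ' ' != c then 1 else 0) + (pvCnt s (a + 1) b c : Int) := by
  unfold pvCnt
  have hb : b - a = (b - (a + 1)) + 1 := by omega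
  rw [hb, List.range'_succ, List.countP_cons]
  split_ifs <;> simp_all <;> omega

theorem pvCnt_snoc (s : List Char) (a b : Nat) (c : Char) (h : a ≤ b) :
    (pvCnt s a (b + 1) c : Int) = (pvCnt s a b c : Int) + (if s.getD b ' ' != c then 1 else 0) := by
  unfold pvCnt
  have hb : b + 1 - a = (b - a) + 1 := by omega
  rw [hb, List.range'_concat, List.countP_append]
  have hab : a + 1 * (b - a) = b := by omega
  rw [hab]
  simp only [List.countP_cons, List.countP_nil, Nat.zero_add]
  split_ifs <;> push_cast <;> omega

-- pyRange between Nat casts, explicitly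
theorem pv_pyRange_natCast (a b : Nat) :
    PySem.List.pyRange (a : Int) (b : Int) = (List.range (b - a)).map (fun i => ((a + i : Nat) : Int)) := by
  by_cases hab : a < b
  · have hd : b - a ≠ 0 := by omega
    obtain ⟨d, hd'⟩ : ∃ d, b - a = d + 1 := ⟨b - a - 1, by omega⟩
    induction d generalizing a with
    | zero =>
      rw [PySem.List.pyRange_one_cons (by exact_mod_cast hab)]
      have : ((a : Int) + 1) = ((a + 1 : Nat) : Int) := by push_cast; ring
      rw [this, PySem.List.pyRange_one_eq_nil (by exact_mod_cast (by omega : b ≤ a + 1))]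
      simp [hd']
    | succ k ih =>
      rw [PySem.List.pyRange_one_cons (by exact_mod_cast hab)]
      have hcast : ((a : Int) + 1) = ((a + 1 : Nat) : Int) := by push_cast; ring
      rw [hcast, ih (a + 1) (by omega) (by omega) (by omega)]
      rw [hd', List.range_succ_eq_map]
      simp only [List.map_cons, List.map_map]
      apply List.cons_eq_cons.mpr
      refine ⟨by simp, ?_⟩
      have hba : b - (a + 1) = k + 1 := by omega
      rw [hba]
      apply List.map_congr_left; intro x _
      simp only [Function.comp]
      congr 1; omega
  · rw [PySem.List.pyRange_one_eq_nil (by exact_mod_cast (by omega : b ≤ a))]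
    have : b - a = 0 := by omega
    simp [this]

-- each of A's index loops counts mismatches over its index interval
theorem pv_loopA (s : List Char) (a b : Nat) (c : Char) (init : Int) :
    (PySem.List.pyRange (a : Int) (b : Int)).foldl
      (fun acc i => if PySem.List.pyGetD s i ' ' != c then acc + 1 else acc) init
    = init + (pvCnt s a b c : Int) := by
  rw [pv_pyRange_natCast, PySem.List.foldl_if_add_one, List.countP_map]
  congr 1
  unfold pvCnt
  rw [List.range'_eq_map_range, List.countP_map]
  congr 1
  apply List.countP_congr
  intro x _
  simp only [Function.comp_apply, PySem.List.pyGetD_natCast]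

-- B's two-pointer loop, by strong induction on the window width, counts exactly
-- A's per-half mismatches: paired indices straddle len/2, the middle index equals it.
theorem pv_msGo (s : List Char) : ∀ (d i j : Nat) (acc : Int),
    j + 1 - i = d → i + j + 1 = s.length → i ≤ j + 1 →
    msGo s (i : Int) (j : Int) acc
      = acc + (pvCnt s i (min (j + 1) (s.length / 2)) '>' : Int)
            + (pvCnt s (max i (s.length / 2)) (j + 1) '<' : Int) := by
  intro d
  induction d using Nat.strong_induction_on with
  | _ d ih =>
    intro i j acc hd hn hij
    by_cases hlt : i < j
    · have hltz : (i : Int) < (j : Int) := by exact_mod_cast hlt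
      rw [msGo]
      rw [dif_pos hltz]
      have hc1 : (i : Int) + 1 = ((i + 1 : Nat) : Int) := by push_cast; ring
      have hc2 : (j : Int) - 1 = ((j - 1 : Nat) : Int) := by omega
      have h1 : i + 1 ≤ s.length / 2 := by omega
      have h2 : s.length / 2 ≤ j := by omega
      simp only [PySem.List.pyGetD_natCast]
      rw [hc1, hc2,
        ih (j - i - 1) (by omega) (i + 1) (j - 1) _ (by omega) (by omega) (by omega)]
      have hj1 : j - 1 + 1 = j := by omega
      rw [hj1]
      have hmin1 : min (j + 1) (s.length / 2) = s.length / 2 := by omega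
      have hmin2 : min j (s.length / 2) = s.length / 2 := by omega
      have hmax1 : max i (s.length / 2) = s.length / 2 := by omega
      have hmax2 : max (i + 1) (s.length / 2) = s.length / 2 := by omega
      rw [hmin1, hmin2, hmax1, hmax2,
        pvCnt_cons s i (s.length / 2) '>' (by omega),
        pvCnt_snoc s (s.length / 2) j '<' (by omega)]
      split_ifs <;> push_cast <;> ring
    · by_cases heq : i = j
      · have hh : s.length / 2 = i := by omega
        have heqz : (i : Int) = (j : Int) := by exact_mod_cast heq
        rw [msGo, dif_neg (by omega : ¬ (i : Int) < (j : Int)), if_pos heqz]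
        simp only [PySem.List.pyGetD_natCast]
        subst heq
        rw [hh]
        have hmin : min (i + 1) i = i := by omega
        rw [hmin, pvCnt_empty, max_self,
          pvCnt_snoc s i i '<' (le_refl i), pvCnt_empty]
        split_ifs <;> push_cast <;> ring
      · have hij' : i = j + 1 := by omega
        have hh : s.length / 2 = i := by omega
        rw [msGo, dif_neg (by omega : ¬ (i : Int) < (j : Int)),
          if_neg (by omega : ¬ (i : Int) = (j : Int))]
        rw [hh, hij']
        simp [pvCnt_empty]

-- ===== VERDICT (by name: the statement is the Claim_ definition above) =====
theorem magic_string_spec : Claim_equal_magic_string := by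
  intro string _
  unfold Spec_magic_string magic_string magic_string_alt
  set s := string.toList with hs
  have hlen : PySem.Str.len string = (s.length : Int) := PySem.Str.len_eq string
  have hfd : PySem.Int.floordiv (s.length : Int) 2 = ((s.length / 2 : Nat) : Int) := by
    exact_mod_cast PySem.Int.floordiv_natCast s.length 2
  simp only [hlen, hfd]
  have h0 : (0 : Int) = ((0 : Nat) : Int) := by norm_num
  rw [h0, pv_loopA s 0 (s.length / 2) '>' (((0 : Nat) : Int)),
    pv_loopA s (s.length / 2) s.length '<' _]
  cases hn : s.length with
  | zero =>
    rw [msGo]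
    norm_num [pvCnt_empty]
  | succ m =>
    have hc : ((m + 1 : Nat) : Int) - 1 = ((m : Nat) : Int) := by push_cast; ring
    rw [hc, pv_msGo s (m + 1) 0 m (((0 : Nat) : Int)) (by omega) (by omega) (by omega)]
    have hmin : min (m + 1) (s.length / 2) = (m + 1) / 2 := by omega
    have hmax : max 0 (s.length / 2) = (m + 1) / 2 := by omega
    rw [hmin, hmax]
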